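-- pv_equiv track=rewrite | github.com/bazria/python_code | baz_utilities.py | unquoted
-- ===== SOURCE A (Python) =====
-- def unquoted(string):
--     """
--     Remove as many pairs of enclosing quotes (simple or double) as possible.
--     """
--     try:
--         if (string.startswith('"') and string.endswith('"')):
--             return unquoted(string.lstrip('"').rstrip('"'))
--         elif (string.startswith("'") and string.endswith("'")):
--             return unquoted(string.lstrip("'").rstrip("'"))
--         else:
--             return(string)
--     except:
--         return(string)
-- ===== SOURCE B (Python) =====
-- def unquoted(string):
--     """
--     Remove as many pairs of enclosing quotes (simple or double) as possible.
--     """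
--     try:
--         chars = list(string)
--         while chars and chars[0] == chars[-1] and chars[0] in '"\'':
--             q = chars[0]
--             while chars and chars[0] == q:
--                 chars.pop(0)
--             while chars and chars[-1] == q:
--                 chars.pop()
--         return ''.join(chars)
--     except:
--         return string
-- ===== Notes on version B (the rewrite author's own statement) =====
-- stated objective: alternative
-- what changed: Replaces A's tail recursion over string lstrip/rstrip with an explicit while-loop that pops runs of the enclosing quote character off both ends of a char list and joins at the end.
import Mathlib
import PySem

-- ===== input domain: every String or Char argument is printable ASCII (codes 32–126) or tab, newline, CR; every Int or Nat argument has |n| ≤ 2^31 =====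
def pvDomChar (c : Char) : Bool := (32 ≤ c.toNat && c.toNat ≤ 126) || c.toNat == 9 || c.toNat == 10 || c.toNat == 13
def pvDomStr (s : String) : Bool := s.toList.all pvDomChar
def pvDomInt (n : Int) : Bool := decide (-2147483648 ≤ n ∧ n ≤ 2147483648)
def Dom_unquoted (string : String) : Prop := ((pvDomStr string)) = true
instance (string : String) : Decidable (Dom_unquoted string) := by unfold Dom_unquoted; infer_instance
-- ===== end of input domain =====

-- B replaces A's recursion over lstrip/rstrip by an explicit loop popping quote runs
-- from a char list (objective: alternative decomposition, same asymptotic cost).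

-- ===== PORT A =====
-- lstrip with the single-char set {q} = drop the maximal leading run of q (exact)
def uqLstrip (q : Char) (l : List Char) : List Char := l.dropWhile (· == q)
-- rstrip with the single-char set {q} (exact)
def uqRstrip (q : Char) (l : List Char) : List Char := (l.reverse.dropWhile (· == q)).reverse

theorem uqStrip_lt (q : Char) (l : List Char) (h : l.head? = some q) :
    (uqRstrip q (uqLstrip q l)).length < l.length := by
  cases l with
  | nil => simp at h
  | cons c rest =>
    have hc : c = q := by simpa using h
    have h1 : (uqLstrip q (c :: rest)).length ≤ rest.length := by
      simpa [uqLstrip, List.dropWhile_cons, hc] using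
        List.length_dropWhile_le (· == q) rest
    have h2 : (uqRstrip q (uqLstrip q (c :: rest))).length ≤ (uqLstrip q (c :: rest)).length := by
      simpa [uqRstrip] using
        List.length_dropWhile_le (· == q) (uqLstrip q (c :: rest)).reverse
    simp only [List.length_cons]
    omega

-- recursion of A: startswith/endswith guards, then recurse on the stripped string
def uqA (l : List Char) : List Char :=
  if h1 : l.head? = some '"' ∧ l.getLast? = some '"' then
    uqA (uqRstrip '"' (uqLstrip '"' l))
  else if h2 : l.head? = some '\'' ∧ l.getLast? = some '\'' then
    uqA (uqRstrip '\'' (uqLstrip '\'' l))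
  else l
termination_by l.length
decreasing_by
  · exact uqStrip_lt _ _ h1.1
  · exact uqStrip_lt _ _ h2.1

def unquoted (string : String) : String := String.mk (uqA string.toList)

-- ===== PORT B =====
-- inner loop: while chars and chars[0] == q: chars.pop(0)
def uqPopFront (q : Char) : List Char → List Char
  | [] => []
  | c :: rest => if c == q then uqPopFront q rest else c :: rest

-- inner loop: while chars and chars[-1] == q: chars.pop()
def uqPopBack (q : Char) (l : List Char) : List Char :=
  if l.getLast? = some q then uqPopBack q l.dropLast else l
termination_by l.length
decreasing_by
  rename_i h
  cases l with
  | nil => simp at h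
  | cons c rest => simp [List.length_dropLast]

theorem uqPopFront_eq (q : Char) (l : List Char) :
    uqPopFront q l = uqLstrip q l := by
  induction l with
  | nil => rfl
  | cons c rest ih =>
    by_cases hc : c = q <;> simp [uqPopFront, uqLstrip, List.dropWhile_cons, hc, ih]

theorem uqPopBack_rev (q : Char) (r : List Char) :
    uqPopBack q r.reverse = (uqPopFront q r).reverse := by
  induction r with
  | nil => rw [uqPopBack]; simp [uqPopFront]
  | cons c t ih =>
    by_cases hc : c = q
    · rw [uqPopBack]
      simp [hc, uqPopFront]
      exact ih
    · rw [uqPopBack, if_neg (by simp [hc])]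
      simp [uqPopFront, hc]

theorem uqPopBack_eq (q : Char) (l : List Char) :
    uqPopBack q l = uqRstrip q l := by
  have := uqPopBack_rev q l.reverse
  rw [List.reverse_reverse] at this
  rw [this, uqPopFront_eq, uqRstrip, uqLstrip]

-- outer loop: while chars and chars[0] == chars[-1] and chars[0] in '"\''
def uqLoopB (l : List Char) : List Char :=
  if h : l.head? = l.getLast? ∧ (l.head? = some '"' ∨ l.head? = some '\'') then
    let q := l.headD ' '
    uqLoopB (uqPopBack q (uqPopFront q l))
  else l
termination_by l.length
decreasing_by
  have hq : l.head? = some (l.headD ' ') := by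
    rcases h.2 with h2 | h2 <;> simp [List.headD_eq_head?, h2]
  rw [uqPopBack_eq, uqPopFront_eq]
  exact uqStrip_lt _ _ hq

def unquoted_alt (string : String) : String := String.mk (uqLoopB string.toList)

-- ===== PRECONDITION & SPEC =====
def Spec_unquoted (string : String) (out : String) : Prop := out = unquoted_alt string
instance (string : String) (out : String) : Decidable (Spec_unquoted string out) := by unfold Spec_unquoted; infer_instance

-- ===== CLAIM (what is proved, stated in full; the proofs are below) =====
def Claim_equal_unquoted : Prop := ∀ (string : String), Dom_unquoted string → Spec_unquoted string (unquoted string)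

-- ===== LEMMAS AND PROOFS =====
theorem uqLoopB_step (l : List Char) (q : Char) (hh : l.head? = some q)
    (hl : l.getLast? = some q) (hq : q = '"' ∨ q = '\'') :
    uqLoopB l = uqLoopB (uqRstrip q (uqLstrip q l)) := by
  rw [uqLoopB]
  have hcond : l.head? = l.getLast? ∧ (l.head? = some '"' ∨ l.head? = some '\'') := by
    refine ⟨by rw [hh, hl], ?_⟩
    rcases hq with h | h
    · exact Or.inl (by rw [hh, h])
    · exact Or.inr (by rw [hh, h])
  rw [dif_pos hcond]
  have hd : l.headD ' ' = q := by simp [hh]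
  simp only [hd, uqPopBack_eq, uqPopFront_eq]

theorem uqA_eq_loopB (l : List Char) : uqA l = uqLoopB l := by
  induction l using uqA.induct with
  | case1 l h ih =>
    rw [uqA, dif_pos h, ih, ← uqLoopB_step l '"' h.1 h.2 (Or.inl rfl)]
  | case2 l h1 h2 ih =>
    rw [uqA, dif_neg h1, dif_pos h2, ih, ← uqLoopB_step l '\'' h2.1 h2.2 (Or.inr rfl)]
  | case3 l h1 h2 =>
    rw [uqA, dif_neg h1, dif_neg h2, uqLoopB, dif_neg]
    rintro ⟨heq, hq | hq⟩
    · exact h1 ⟨hq, heq ▸ hq⟩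
    · exact h2 ⟨hq, heq ▸ hq⟩

-- ===== VERDICT (by name: the statement is the Claim_ definition above) =====
theorem unquoted_spec : Claim_equal_unquoted := by
  intro s _
  unfold Spec_unquoted unquoted unquoted_alt
  rw [uqA_eq_loopB]
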